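-- pv_equiv track=rewrite | github.com/Holoking/bots | packages/gammar_reckognition/test.py | regroup_expr
-- ===== SOURCE A (Python) =====
-- keywords = ['or','and']
--
-- def regroup_expr(exprs):
-- 	regrouped = []
-- 	i = 0
--
-- 	while i < len(exprs):
-- 		current = ''
--
-- 		if exprs[i] in keywords:
-- 			regrouped.append(exprs[i])
-- 			i+=1
--
-- 		while i < len(exprs) and not exprs[i] in keywords:
-- 			current += str(exprs[i])+' '
-- 			i+=1
--
-- 		current = current[:-1]
-- 		regrouped.append(current)
--
-- 	while '' in regrouped:
-- 		regrouped.remove('')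
--
-- 	return regrouped
-- ===== SOURCE B (Python) =====
-- keywords = ['or','and']
--
-- def regroup_expr(exprs):
-- 	result = []
-- 	run = []
-- 	for tok in exprs:
-- 		if tok in keywords:
-- 			if run:
-- 				result.append(' '.join(run))
-- 				run = []
-- 			result.append(tok)
-- 		else:
-- 			run.append(str(tok))
-- 	if run:
-- 		result.append(' '.join(run))
-- 	return [x for x in result if x != '']
-- ===== Notes on version B (the rewrite author's own statement) =====
-- stated objective: simpler
-- what changed: Replaced the index-driven nested while loops (build each group by string concatenation with a trailing space, trim it, then purge '' entries with a repeated remove('') scan) by a single for-loop fold that collects the current non-keyword run in a list and flushes it with ' '.join at keyword boundaries, with one final list-comprehension filter.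
import Mathlib
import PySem

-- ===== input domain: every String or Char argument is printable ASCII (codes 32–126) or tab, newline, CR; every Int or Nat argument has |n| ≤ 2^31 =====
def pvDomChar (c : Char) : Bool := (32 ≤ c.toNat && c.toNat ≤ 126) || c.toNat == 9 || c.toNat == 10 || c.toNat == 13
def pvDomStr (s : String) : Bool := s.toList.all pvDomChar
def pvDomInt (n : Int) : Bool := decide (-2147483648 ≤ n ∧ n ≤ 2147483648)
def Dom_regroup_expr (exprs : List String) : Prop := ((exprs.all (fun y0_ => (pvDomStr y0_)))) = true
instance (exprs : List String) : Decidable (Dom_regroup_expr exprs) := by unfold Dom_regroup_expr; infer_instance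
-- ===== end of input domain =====

-- B replaces A's index-driven nested while loops (join-with-trailing-space, trim, then a
-- remove('') purge loop) by a single fold that flushes the current run with ' '.join at
-- keyword boundaries; objective: simpler. Return-value equivalence only (A mutates nothing).

-- ===== PORT A =====
def pvKeywords : List String := ["or", "and"]

-- inner while loop: 'while i < len(exprs) and not exprs[i] in keywords: current += str(exprs[i])+" "; i+=1'
def pvInnerA : List String → String → String × List String
  | [], cur => (cur, [])
  | x :: xs, cur => if x ∈ pvKeywords then (cur, x :: xs) else pvInnerA xs (cur ++ x ++ " ")

lemma pvInnerA_len (xs : List String) (cur : String) : (pvInnerA xs cur).2.length ≤ xs.length := by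
  induction xs generalizing cur with
  | nil => simp [pvInnerA]
  | cons x xs ih =>
    simp only [pvInnerA]
    split
    · simp
    · exact Nat.le_trans (ih _) (Nat.le_succ _)

-- current[:-1]
def pvTrimA (s : String) : String := PySem.Str.slice s none (some (-1))

-- outer while loop over i; each iteration consumes ≥ 1 token
def pvOuterA : List String → List String → List String
  | [], acc => acc
  | x :: xs, acc =>
    if x ∈ pvKeywords then
      -- 'regrouped.append(exprs[i]); i+=1' then the inner loop from i, then append current[:-1]
      let r := pvInnerA xs ""
      pvOuterA r.2 (acc ++ [x, pvTrimA r.1])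
    else
      -- inner loop starting at i: first iteration already sets current = '' + exprs[i] + ' '
      let r := pvInnerA xs ("" ++ x ++ " ")
      pvOuterA r.2 (acc ++ [pvTrimA r.1])
  termination_by l _ => l.length
  decreasing_by
  · exact Nat.lt_succ_of_le (pvInnerA_len xs "")
  · exact Nat.lt_succ_of_le (pvInnerA_len xs _)

-- list.remove(''): removes the first occurrence (exact hand port)
def pvRemoveFirstA : List String → List String
  | [] => []
  | x :: xs => if x = "" then xs else x :: pvRemoveFirstA xs

lemma pvRemoveFirstA_len {l : List String} (h : "" ∈ l) : (pvRemoveFirstA l).length < l.length := by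
  induction l with
  | nil => cases h
  | cons x xs ih =>
    simp only [pvRemoveFirstA]
    split
    · simp
    · rename_i hx
      have hm : "" ∈ xs := by
        rcases List.mem_cons.mp h with h' | h'
        · exact absurd h'.symm hx
        · exact h'
      simpa using Nat.succ_lt_succ (ih hm)

-- 'while "" in regrouped: regrouped.remove("")'
def pvPurgeA (l : List String) : List String :=
  if h : "" ∈ l then pvPurgeA (pvRemoveFirstA l) else l
  termination_by l.length
  decreasing_by exact pvRemoveFirstA_len h

def regroup_expr (exprs : List String) : List String :=
  pvPurgeA (pvOuterA exprs [])

-- ===== PORT B =====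
-- ' '.join(run)
def pvJoinSp (run : List String) : String := PySem.Str.join " " run

-- loop body of B's single for-loop: state (result, run)
def pvStepB (st : List String × List String) (tok : String) : List String × List String :=
  if tok ∈ pvKeywords then
    ((if st.2 ≠ [] then st.1 ++ [pvJoinSp st.2] else st.1) ++ [tok], [])
  else
    (st.1, st.2 ++ [tok])

def regroup_expr_alt (exprs : List String) : List String :=
  let st := exprs.foldl pvStepB ([], [])
  let res := if st.2 ≠ [] then st.1 ++ [pvJoinSp st.2] else st.1
  res.filter (· != "")

-- ===== PRECONDITION & SPEC =====
def Spec_regroup_expr (exprs : List String) (out : List String) : Prop := out = regroup_expr_alt exprs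
instance (exprs : List String) (out : List String) : Decidable (Spec_regroup_expr exprs out) := by unfold Spec_regroup_expr; infer_instance

-- ===== CLAIM (what is proved, stated in full; the proofs are below) =====
def Claim_equal_regroup_expr : Prop := ∀ (exprs : List String), Dom_regroup_expr exprs → Spec_regroup_expr exprs (regroup_expr exprs)

-- ===== LEMMAS AND PROOFS =====

-- tokens that are not keywords (the guard of both runs)
def pvNK (x : String) : Bool := !(decide (x ∈ pvKeywords))

-- the string A's inner loop accumulates over a run
def pvS : List String → String
  | [] => ""
  | x :: r => x ++ " " ++ pvS r

-- [s] filtered by ≠ ""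
def pvF1 (s : String) : List String := if s = "" then [] else [s]

-- canonical (span-based) result both sides are reduced to
def pvCanon : List String → List String
  | [] => []
  | x :: xs =>
    if x ∈ pvKeywords then x :: pvCanon xs
    else pvF1 (pvJoinSp (x :: xs.takeWhile pvNK)) ++ pvCanon (xs.dropWhile pvNK)
  termination_by l => l.length
  decreasing_by
  · simp only [List.length_cons]; omega
  · have := List.length_dropWhile_le pvNK xs; simp only [List.length_cons]; omega

lemma pvStr_ext {s t : String} (h : s.toList = t.toList) : s = t := String.toList_inj.mp h

-- keyword tokens are never the empty string
lemma pvKw_ne_empty {x : String} (h : x ∈ pvKeywords) : (x != "") = true := by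
  have hx : x = "or" ∨ x = "and" := by simpa [pvKeywords] using h
  rcases hx with rfl | rfl <;> decide

-- ' '.join [] = ''
lemma pvJoinSp_nil : pvJoinSp [] = "" := by
  apply pvStr_ext
  simp [pvJoinSp, PySem.Str.toList_join, PySem.Chars.join_nil]

-- the accumulated run string, one space after each token
lemma pvS_toList_ne_nil {x : String} {r : List String} :
    (pvS (x :: r)).toList = PySem.Chars.join [' '] ((x :: r).map String.toList) ++ [' '] := by
  induction r generalizing x with
  | nil => simp [pvS, PySem.Chars.join_singleton]
  | cons y r ih =>
    have := ih (x := y)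
    simp only [pvS, List.map_cons] at *
    rw [PySem.Chars.join_cons_cons]
    simp only [String.toList_append, this]
    simp

-- current[:-1] of the accumulated run string is exactly ' '.join(run)
lemma pvTrim_S (r : List String) : pvTrimA (pvS r) = pvJoinSp r := by
  apply pvStr_ext
  rw [pvTrimA, PySem.Str.slice_to_neg_one, pvJoinSp, PySem.Str.toList_join]
  cases r with
  | nil => simp [pvS, PySem.Chars.join_nil]
  | cons x r => rw [pvS_toList_ne_nil]; simp

-- A's inner loop = span over the non-keyword prefix
lemma pvInnerA_spec (xs : List String) (cur : String) :
    pvInnerA xs cur = (cur ++ pvS (xs.takeWhile pvNK), xs.dropWhile pvNK) := by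
  induction xs generalizing cur with
  | nil => simp [pvInnerA, pvS]
  | cons x xs ih =>
    by_cases h : x ∈ pvKeywords
    · simp [pvInnerA, h, pvNK, pvS]
    · rw [pvInnerA]
      simp only [h, if_false, ih]
      simp [pvNK, h, List.dropWhile_cons, pvS, String.append_assoc]

-- A's outer loop is accumulator-append
lemma pvOuterA_acc_fuel : ∀ n l acc, l.length ≤ n → pvOuterA l acc = acc ++ pvOuterA l [] := by
  intro n
  induction n with
  | zero =>
    intro l acc hl
    rw [List.length_eq_zero_iff.mp (Nat.le_zero.mp hl)]
    simp [pvOuterA]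
  | succ n ih =>
    intro l acc hl
    cases l with
    | nil => simp [pvOuterA]
    | cons x xs =>
      have hrest : (xs.dropWhile pvNK).length ≤ n := by
        have := List.length_dropWhile_le pvNK xs
        simp only [List.length_cons] at hl
        omega
      by_cases h : x ∈ pvKeywords <;>
      · simp only [pvOuterA, pvInnerA_spec, h, if_true, if_false]
        rw [ih _ _ hrest, ih _ ([] ++ _) hrest]
        simp

lemma pvOuterA_acc (l acc : List String) : pvOuterA l acc = acc ++ pvOuterA l [] :=
  pvOuterA_acc_fuel l.length l acc (le_refl _)

-- the '' purge loop is a filter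
lemma pvRemoveFirstA_filter {l : List String} (h : "" ∈ l) :
    (pvRemoveFirstA l).filter (· != "") = l.filter (· != "") := by
  induction l with
  | nil => cases h
  | cons x xs ih =>
    by_cases hx : x = ""
    · subst hx; simp [pvRemoveFirstA]
    · have hm : "" ∈ xs := by
        rcases List.mem_cons.mp h with h' | h'
        · exact absurd h'.symm hx
        · exact h'
      simp only [pvRemoveFirstA, hx, if_false, List.filter_cons]
      rw [ih hm]

lemma pvPurgeA_filter (l : List String) : pvPurgeA l = l.filter (· != "") := by
  induction l using pvPurgeA.induct with
  | case1 l h ih =>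
    rw [pvPurgeA]
    simp only [h, dif_pos]
    rw [ih, pvRemoveFirstA_filter h]
  | case2 l h =>
    rw [pvPurgeA]
    simp only [h]
    symm
    apply List.filter_eq_self.mpr
    intro a ha
    simp only [bne_iff_ne, ne_eq]
    rintro rfl
    exact h ha

-- unfolding one span of pvCanon
lemma pvCanon_span (xs : List String) :
    pvCanon xs = pvF1 (pvJoinSp (xs.takeWhile pvNK)) ++ pvCanon (xs.dropWhile pvNK) := by
  cases xs with
  | nil => simp [pvCanon, pvJoinSp_nil, pvF1]
  | cons x xs =>
    by_cases h : x ∈ pvKeywords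
    · have hnk : pvNK x = false := by simp [pvNK, h]
      simp [List.dropWhile_cons, hnk, pvJoinSp_nil, pvF1]
    · have hnk : pvNK x = true := by simp [pvNK, h]
      rw [pvCanon]
      simp [List.dropWhile_cons, hnk, h]

lemma pvFilter_single (s : String) : [s].filter (· != "") = pvF1 s := by
  by_cases h : s = "" <;> simp [pvF1, h]

-- A's outer loop, filtered, is pvCanon
lemma pvA_main : ∀ n l, l.length ≤ n → (pvOuterA l []).filter (· != "") = pvCanon l := by
  intro n
  induction n with
  | zero =>
    intro l hl
    rw [List.length_eq_zero_iff.mp (Nat.le_zero.mp hl)]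
    simp [pvOuterA, pvCanon]
  | succ n ih =>
    intro l hl
    cases l with
    | nil => simp [pvOuterA, pvCanon]
    | cons x xs =>
      have hrest : (xs.dropWhile pvNK).length ≤ n := by
        have := List.length_dropWhile_le pvNK xs
        simp only [List.length_cons] at hl
        omega
      have hemp : ("" : String) ++ pvS (xs.takeWhile pvNK) = pvS (xs.takeWhile pvNK) := by
        apply pvStr_ext; simp
      by_cases h : x ∈ pvKeywords
      · rw [pvOuterA]
        simp only [h, if_true, pvInnerA_spec]
        rw [pvOuterA_acc]
        simp only [List.nil_append, List.filter_append]
        rw [ih _ hrest, hemp, pvTrim_S]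
        simp only [List.filter_cons, List.filter_nil, pvKw_ne_empty h, if_true]
        rw [pvCanon]
        simp only [h, if_true]
        rw [pvCanon_span xs]
        by_cases hj : pvJoinSp (xs.takeWhile pvNK) = "" <;> simp [pvF1, hj]
      · rw [pvOuterA]
        simp only [h, if_false, pvInnerA_spec]
        rw [pvOuterA_acc]
        simp only [List.nil_append, List.filter_append]
        rw [ih _ hrest]
        have hs : ("" ++ x ++ " ") ++ pvS (xs.takeWhile pvNK) = pvS (x :: xs.takeWhile pvNK) := by
          apply pvStr_ext; simp [pvS]
        rw [hs, pvTrim_S, pvFilter_single]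
        rw [pvCanon]
        simp only [h, if_false]

-- B's flush (the two 'if run: result.append(...)' sites)
def pvFlushB (st : List String × List String) : List String :=
  if st.2 ≠ [] then st.1 ++ [pvJoinSp st.2] else st.1

-- B's fold accumulates results by append
lemma pvFoldB_acc (l : List String) : ∀ res run,
    l.foldl pvStepB (res, run) =
      (res ++ (l.foldl pvStepB ([], run)).1, (l.foldl pvStepB ([], run)).2) := by
  induction l with
  | nil => intro res run; simp
  | cons x xs ih =>
    intro res run
    by_cases h : x ∈ pvKeywords
    · simp only [List.foldl_cons, pvStepB, h, if_true]
      rw [ih, ih (res := (if run ≠ [] then ([] : List String) ++ [pvJoinSp run] else []) ++ [x])]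
      cases run <;> simp
    · simp only [List.foldl_cons, pvStepB, h, if_false]
      exact ih res (run ++ [x])

-- the flush of an appended result prefix
lemma pvFlushB_append (pre : List String) (st : List String × List String) :
    pvFlushB (pre ++ st.1, st.2) = pre ++ pvFlushB st := by
  cases st with
  | mk a b =>
    simp only [pvFlushB]
    split <;> simp

lemma pvFlush_filter (run : List String) :
    (if run ≠ [] then [pvJoinSp run] else []).filter (· != "") = pvF1 (pvJoinSp run) := by
  cases run with
  | nil => simp [pvJoinSp_nil, pvF1]
  | cons x r =>
    simp only [ne_eq, reduceCtorEq, not_false_iff, if_true]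
    exact pvFilter_single _

lemma pvFlushB_pair (run : List String) :
    pvFlushB ([], run) = if run ≠ [] then [pvJoinSp run] else [] := by
  rw [pvFlushB]
  split <;> simp

-- B's fold+flush, filtered, is pvCanon of the remaining input (with the pending run prefixed)
lemma pvB_main (l : List String) : ∀ run,
    (pvFlushB (l.foldl pvStepB ([], run))).filter (· != "") =
      pvF1 (pvJoinSp (run ++ l.takeWhile pvNK)) ++ pvCanon (l.dropWhile pvNK) := by
  induction l with
  | nil =>
    intro run
    simp only [List.foldl_nil, List.takeWhile_nil, List.dropWhile_nil, List.append_nil]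
    rw [pvFlushB_pair, pvFlush_filter]
    simp [pvCanon]
  | cons x xs ih =>
    intro run
    by_cases h : x ∈ pvKeywords
    · have hnk : pvNK x = false := by simp [pvNK, h]
      simp only [List.foldl_cons, pvStepB, h, if_true]
      rw [pvFoldB_acc]
      rw [pvFlushB_append ((if run ≠ [] then ([] : List String) ++ [pvJoinSp run] else []) ++ [x])
            (xs.foldl pvStepB ([], []))]
      simp only [List.nil_append, List.filter_append]
      rw [ih []]
      simp only [List.nil_append, List.takeWhile_cons, List.dropWhile_cons, hnk,
        Bool.false_eq_true, if_false]
      rw [pvFlush_filter]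
      simp only [List.filter_cons, pvKw_ne_empty h, if_true, List.filter_nil]
      rw [pvCanon]
      simp only [h, if_true]
      rw [pvCanon_span xs]
      simp
    · have hnk : pvNK x = true := by simp [pvNK, h]
      simp only [List.foldl_cons, pvStepB, h, if_false]
      rw [ih (run ++ [x])]
      simp only [List.takeWhile_cons, List.dropWhile_cons, hnk, if_true]
      simp

-- ===== VERDICT (by name: the statement is the Claim_ definition above) =====
theorem regroup_expr_spec : Claim_equal_regroup_expr := by
  intro exprs _
  unfold Spec_regroup_expr
  rw [regroup_expr, regroup_expr_alt, pvPurgeA_filter]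
  rw [pvA_main exprs.length exprs (le_refl _)]
  show _ = (pvFlushB (exprs.foldl pvStepB ([], []))).filter (· != "")
  rw [pvB_main exprs []]
  simp only [List.nil_append]
  exact pvCanon_span exprs
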